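-- pv_equiv track=rewrite | github.com/fernando-mota-1/interview-prep | recursion/encrypted_words.py | get_middle
-- ===== SOURCE A (Python) =====
-- def get_middle(s):
--   if s:
--     n = len(s)
--     i=0
--     if n%2:
--       i=n//2
--     else:
--       i = (n//2) - 1
--     yield s[i]
--     yield from get_middle(s[:i])
--     yield from get_middle(s[i+1:])
-- ===== SOURCE B (Python) =====
-- def get_middle(s):
--     if not s:
--         return
--     stack = [(0, len(s))]
--     while stack:
--         lo, hi = stack.pop()
--         if lo >= hi:
--             continue
--         n = hi - lo
--         i = lo + (n // 2 if n % 2 else n // 2 - 1)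
--         yield s[i]
--         stack.append((i + 1, hi))
--         stack.append((lo, i))
-- ===== Notes on version B (the rewrite author's own statement) =====
-- stated objective: faster
-- what changed: Replaced A's recursive generator, which builds new substrings s[:i] and s[i+1:] at every call, by an iterative generator driven by an explicit stack of (lo, hi) index ranges over the original string, yielding the same middle-left-right preorder without constructing any substrings.
import Mathlib
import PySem

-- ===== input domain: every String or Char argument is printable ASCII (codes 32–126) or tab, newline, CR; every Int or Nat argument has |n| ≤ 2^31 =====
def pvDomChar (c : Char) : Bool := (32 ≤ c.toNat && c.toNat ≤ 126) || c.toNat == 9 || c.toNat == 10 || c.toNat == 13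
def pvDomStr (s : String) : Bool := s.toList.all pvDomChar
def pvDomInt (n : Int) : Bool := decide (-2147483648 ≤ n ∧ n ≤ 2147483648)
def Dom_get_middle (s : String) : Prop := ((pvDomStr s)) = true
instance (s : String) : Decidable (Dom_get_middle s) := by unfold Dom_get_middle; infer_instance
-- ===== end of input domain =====

-- B replaces A's recursion over freshly built substrings by an iterative explicit
-- stack of (lo, hi) index ranges over the original string (objective: alternative;
-- yields the same middle→left→right sequence). Both ports list the generator's yields.

-- ===== PORT A =====
-- recursive generator; s[:i] / s[i+1:] are in-range nonnegative slices = take/drop,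
-- s[i] is a provably in-range index (getD's default is never used)
def gmA : List Char → List String
  | [] => []
  | c :: rest =>
    let cs := c :: rest
    let n := cs.length
    let i := if n % 2 ≠ 0 then n / 2 else n / 2 - 1
    String.ofList [cs.getD i ' '] :: (gmA (cs.take i) ++ gmA (cs.drop (i + 1)))
termination_by cs => cs.length
decreasing_by
  all_goals
    simp only [List.length_take, List.length_drop, List.length_cons]
    split <;> omega

def get_middle (s : String) : List String := gmA s.toList

-- ===== PORT B =====
-- i = lo + (n//2 if n%2 else n//2-1), B's middle index of the range (lo, hi)
def gmIdx (lo hi : Nat) : Nat :=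
  lo + (if (hi - lo) % 2 ≠ 0 then (hi - lo) / 2 else (hi - lo) / 2 - 1)

lemma gmIdx_lt (lo hi : Nat) (h : lo < hi) : gmIdx lo hi < hi := by
  unfold gmIdx; split <;> omega

lemma le_gmIdx (lo hi : Nat) : lo ≤ gmIdx lo hi := by
  unfold gmIdx; omega

-- measure: total weighted size of the pending ranges
def gmMeas (st : List (Nat × Nat)) : Nat := (st.map (fun p => 2 * (p.2 - p.1) + 1)).sum

def gmLoop (cs : List Char) : List (Nat × Nat) → List String
  | [] => []
  | (lo, hi) :: st =>
    if lo ≥ hi then gmLoop cs st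
    else
      String.ofList [cs.getD (gmIdx lo hi) ' '] ::
        gmLoop cs ((lo, gmIdx lo hi) :: (gmIdx lo hi + 1, hi) :: st)
termination_by st => gmMeas st
decreasing_by
  · simp [gmMeas]
  · have h1 := gmIdx_lt lo hi (by omega)
    have h2 := le_gmIdx lo hi
    simp [gmMeas]; omega

def get_middle_alt (s : String) : List String :=
  if s.toList = [] then [] else gmLoop s.toList [(0, s.toList.length)]

-- ===== PRECONDITION & SPEC =====
def Spec_get_middle (s : String) (out : List String) : Prop := out = get_middle_alt s
instance (s : String) (out : List String) : Decidable (Spec_get_middle s out) := by unfold Spec_get_middle; infer_instance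

-- ===== CLAIM (what is proved, stated in full; the proofs are below) =====
def Claim_equal_get_middle : Prop := ∀ (s : String), Dom_get_middle s → Spec_get_middle s (get_middle s)

-- ===== LEMMAS AND PROOFS =====

-- recursive description of what the loop produces for one range
def gmSeg (cs : List Char) (lo hi : Nat) : List String :=
  if lo ≥ hi then []
  else
    String.ofList [cs.getD (gmIdx lo hi) ' '] ::
      (gmSeg cs lo (gmIdx lo hi) ++ gmSeg cs (gmIdx lo hi + 1) hi)
termination_by hi - lo
decreasing_by
  · have h1 := gmIdx_lt lo hi (by omega)
    have h2 := le_gmIdx lo hi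
    omega
  · have h1 := gmIdx_lt lo hi (by omega)
    have h2 := le_gmIdx lo hi
    omega

lemma gmLoop_eq_seg (cs : List Char) (st : List (Nat × Nat)) :
    gmLoop cs st = (st.map (fun p => gmSeg cs p.1 p.2)).flatten := by
  induction st using gmLoop.induct with
  | case1 => simp [gmLoop]
  | case2 lo hi st h ih =>
    rw [gmLoop, if_pos h, ih]
    rw [List.map_cons, List.flatten_cons, gmSeg, if_pos h, List.nil_append]
  | case3 lo hi st h ih =>
    rw [gmLoop, if_neg h, ih]
    conv_rhs => rw [List.map_cons, List.flatten_cons, gmSeg, if_neg h]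
    simp [List.append_assoc]

lemma gmSeg_eq_gmA (cs : List Char) : ∀ (k lo hi : Nat), hi - lo ≤ k → hi ≤ cs.length →
    gmSeg cs lo hi = gmA ((cs.drop lo).take (hi - lo)) := by
  intro k
  induction k with
  | zero =>
    intro lo hi hk _
    rw [gmSeg, if_pos (by omega)]
    have : hi - lo = 0 := by omega
    simp [this, gmA]
  | succ k ih =>
    intro lo hi hk hhi
    by_cases h : lo ≥ hi
    · rw [gmSeg, if_pos h]
      have : hi - lo = 0 := by omega
      simp [this, gmA]
    · rw [gmSeg, if_neg h]
      set n := hi - lo with hn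
      have hn1 : 1 ≤ n := by omega
      set j : Nat := if n % 2 ≠ 0 then n / 2 else n / 2 - 1 with hj
      have hjn : j < n := by rw [hj]; split <;> omega
      have hI : gmIdx lo hi = lo + j := by unfold gmIdx; rw [← hn, ← hj]
      rw [hI]
      -- the substring A recurses on
      set sub := (cs.drop lo).take n with hsub
      have hsublen : sub.length = n := by
        simp [hsub]; omega
      have hne : sub ≠ [] := by
        intro hnil; rw [hnil] at hsublen; simp at hsublen; omega
      obtain ⟨c, rest, hcr⟩ := List.exists_cons_of_ne_nil hne
      rw [hcr, gmA, ← hcr]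
      have hjj : (if sub.length % 2 ≠ 0 then sub.length / 2 else sub.length / 2 - 1) = j := by
        rw [hsublen, hj]
      rw [hjj]
      -- the yielded character
      have hget : sub.getD j ' ' = cs.getD (lo + j) ' ' := by
        have h1 : j < sub.length := by omega
        have h2 : lo + j < cs.length := by omega
        rw [List.getD_eq_getElem _ _ h1, List.getD_eq_getElem _ _ h2]
        simp [hsub]
      -- the two sub-slices
      have htake : sub.take j = (cs.drop lo).take j := by
        rw [hsub, List.take_take, min_eq_left (by omega)]
      have hdrop : sub.drop (j + 1) = (cs.drop (lo + j + 1)).take (hi - (lo + j + 1)) := by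
        rw [hsub, List.drop_take, List.drop_drop]
        congr 1; omega
      rw [hget, htake, hdrop]
      have hl : gmSeg cs lo (lo + j) = gmA ((cs.drop lo).take j) := by
        have := ih lo (lo + j) (by omega) (by omega)
        simpa using this
      have hr : gmSeg cs (lo + j + 1) hi = gmA ((cs.drop (lo + j + 1)).take (hi - (lo + j + 1))) := by
        exact ih (lo + j + 1) hi (by omega) hhi
      rw [← hl, ← hr]

-- ===== VERDICT (by name: the statement is the Claim_ definition above) =====
theorem get_middle_spec : Claim_equal_get_middle := by
  intro s _
  unfold Spec_get_middle get_middle get_middle_alt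
  by_cases h : s.toList = []
  · simp [h, gmA]
  · rw [if_neg h, gmLoop_eq_seg]
    simp only [List.map_cons, List.map_nil, List.flatten_cons, List.flatten_nil, List.append_nil]
    rw [gmSeg_eq_gmA s.toList s.toList.length 0 s.toList.length (by omega) (le_refl _)]
    simp only [Nat.sub_zero, List.drop_zero, List.take_length]
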